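-- pv_equiv track=rewrite | github.com/adriansev/jalien_py | alienpy/tools_nowb.py | get_arg_multiple
-- ===== SOURCE A (Python) =====
-- def list_remove_item(target: list, item: str) -> None:
--     """Remove all instances of item from list"""
--     if not target: return
--     target[:] = [el for el in target if el != item]
--
-- def get_arg_multiple(target: list, item: str) -> list:
--     """Return list of all values for a given arg"""
--     val = None
--     values_list = []
--     idx_to_be_removed = []
--     arg_list_size = len(target)
--     # cannot get the value and remove from list in the same time
--     for idx, x in enumerate(target):
--         if x == item:
--             # if current index (starts at 0) is greater then len - 1, just return
--             if idx + 1 + 1 > arg_list_size: return val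
--             values_list.append(target[idx + 1])
--             idx_to_be_removed.append(idx + 1)
--
--     idx_to_be_removed.reverse()
--     for idx in idx_to_be_removed: target.pop(idx)
--     list_remove_item(target, item)
--     return values_list  # noqa: R504
-- ===== SOURCE B (Python) =====
-- def get_arg_multiple(target: list, item: str) -> list:
--     """Return list of all values for a given arg"""
--     if target and target[-1] == item:
--         return None
--     values = [nxt for cur, nxt in zip(target, target[1:]) if cur == item]
--     kept, prev = [], None
--     for x in target:
--         if x != item and prev != item:
--             kept.append(x)
--         prev = x
--     target[:] = kept
--     return values
-- ===== Notes on version B (the rewrite author's own statement) =====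
-- stated objective: simpler
-- what changed: A enumerates collecting value indices, then reverses and pops them one by one and re-filters the list; B checks the last element once, collects values from adjacent pairs (zip) in one pass, and rebuilds the list in a single filtering pass.
import Mathlib
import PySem

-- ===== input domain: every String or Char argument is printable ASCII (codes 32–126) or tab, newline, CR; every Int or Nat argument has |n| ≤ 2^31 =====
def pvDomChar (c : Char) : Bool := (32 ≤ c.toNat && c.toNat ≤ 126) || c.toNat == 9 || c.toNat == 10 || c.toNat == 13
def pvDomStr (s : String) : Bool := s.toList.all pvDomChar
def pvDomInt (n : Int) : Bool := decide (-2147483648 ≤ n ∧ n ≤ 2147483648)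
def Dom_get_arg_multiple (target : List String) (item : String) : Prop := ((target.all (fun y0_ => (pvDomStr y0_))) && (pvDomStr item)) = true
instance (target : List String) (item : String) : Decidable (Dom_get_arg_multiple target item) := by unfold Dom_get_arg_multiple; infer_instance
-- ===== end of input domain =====

-- B replaces A's enumerate-scan + reverse-pop mutation with a last-element check and one
-- adjacent-pair pass (objective: simpler). Both Pythons mutate `target` identically; the
-- equivalence proved here is about the return value.


-- ===== PORT A =====
-- the `for idx, x in enumerate(target)` loop; carries values_list and idx_to_be_removed
-- (the latter only feeds the in-place mutation of `target`, which does not affect the return value)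
def gamA_loop (target : List String) (item : String) (size : Nat) :
    Nat → List String → List String → List Nat → Option (List String)
  | _, [], vals, _ => some vals
  | idx, x :: rest, vals, idxs =>
    if x == item then
      if idx + 1 + 1 > size then none
      else gamA_loop target item size (idx + 1) rest
        (vals ++ [PySem.List.pyGetD target ((idx : Int) + 1) ""])  -- target[idx+1]; in range under the guard
        (idxs ++ [idx + 1])
    else gamA_loop target item size (idx + 1) rest vals idxs

def get_arg_multiple (target : List String) (item : String) : Option (List String) :=
  -- the trailing pops and list_remove_item mutate `target` only; the returned values_list is unchanged
  gamA_loop target item target.length 0 target [] []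

-- ===== PORT B =====
def get_arg_multiple_alt (target : List String) (item : String) : Option (List String) :=
  if PySem.List.pyGet? target (-1) = some item then none
  else some ((target.zip target.tail).filterMap (fun p => if p.1 == item then some p.2 else none))

-- ===== PRECONDITION & SPEC =====
def Spec_get_arg_multiple (target : List String) (item : String) (out : Option (List String)) : Prop := out = get_arg_multiple_alt target item
instance (target : List String) (item : String) (out : Option (List String)) : Decidable (Spec_get_arg_multiple target item out) := by unfold Spec_get_arg_multiple; infer_instance

-- ===== CLAIM (what is proved, stated in full; the proofs are below) =====
def Claim_equal_get_arg_multiple : Prop := ∀ (target : List String) (item : String), Dom_get_arg_multiple target item → Spec_get_arg_multiple target item (get_arg_multiple target item)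

-- ===== LEMMAS AND PROOFS =====

theorem gamA_loop_cons (target : List String) (item : String) (size idx : Nat)
    (x : String) (rest vals : List String) (idxs : List Nat) :
    gamA_loop target item size idx (x :: rest) vals idxs =
      if x == item then
        if idx + 1 + 1 > size then none
        else gamA_loop target item size (idx + 1) rest
          (vals ++ [PySem.List.pyGetD target ((idx : Int) + 1) ""]) (idxs ++ [idx + 1])
      else gamA_loop target item size (idx + 1) rest vals idxs := rfl

-- key invariant: on the suffix l = target.drop k the loop returns none iff l ends in item,
-- else vals ++ the in-suffix adjacent pairs whose first component is item
theorem gamA_loop_eq (target : List String) (item : String) :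
    ∀ (l : List String) (k : Nat) (vals : List String) (idxs : List Nat),
      target.drop k = l →
      gamA_loop target item target.length k l vals idxs =
        if l.getLast? = some item then none
        else some (vals ++ (l.zip l.tail).filterMap (fun p => if p.1 == item then some p.2 else none)) := by
  intro l
  induction l with
  | nil => intro k vals idxs _; simp [gamA_loop]
  | cons a t ih =>
    intro k vals idxs hdrop
    have hlen : target.length = k + 1 + t.length := by
      have h1 := congrArg List.length hdrop
      simp only [List.length_drop, List.length_cons] at h1
      have hk : k < target.length := by
        by_contra h
        have : target.drop k = [] := List.drop_eq_nil_of_le (by omega)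
        simp [this] at hdrop
      omega
    have hdrop1 : target.drop (k + 1) = t := by
      have := congrArg List.tail hdrop
      simpa [List.tail_drop] using this
    cases t with
    | nil =>
      rw [gamA_loop_cons]
      by_cases ha : a = item
      · simp only [List.length_nil] at hlen
        simp [ha, show k + 1 + 1 > target.length by omega, List.getLast?]
      · simp [gamA_loop, List.getLast?, ha]
    | cons b t' =>
      have hget : PySem.List.pyGetD target ((k : Int) + 1) "" = b := by
        have h1 : target[k+1]? = some b := by
          have h0 : (target.drop (k+1))[0]? = some b := by rw [hdrop1]; rfl
          simpa [List.getElem?_drop] using h0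
        have h2 : ((k : Int) + 1) = ((k + 1 : Nat) : Int) := by push_cast; ring
        rw [h2, PySem.List.pyGetD_natCast]
        simp [List.getD, h1]
      rw [gamA_loop_cons]
      by_cases ha : a = item
      · rw [if_pos (by simp [ha]), if_neg (by simp at hlen ⊢; omega), hget,
          ih (k + 1) (vals ++ [b]) (idxs ++ [k + 1]) hdrop1]
        simp [List.getLast?_cons_cons, ha, List.append_assoc]
      · rw [if_neg (by simp [ha]), ih (k + 1) vals idxs hdrop1]
        simp [List.getLast?_cons_cons, ha]

-- ===== VERDICT (by name: the statement is the Claim_ definition above) =====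
theorem get_arg_multiple_spec : Claim_equal_get_arg_multiple := by
  intro target item _
  unfold Spec_get_arg_multiple get_arg_multiple get_arg_multiple_alt
  rw [gamA_loop_eq target item target 0 [] [] (by simp)]
  rw [PySem.List.pyGet?_neg_one]
  simp
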